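-- pv_equiv track=rewrite | github.com/udaydirsipamu/uday-teja | Python(extended)Day1/ds3.py | enumNPrint
-- ===== SOURCE A (Python) =====
-- def enumNPrint(mystr):
--     words=[]
--     linec,i,size=1,0,len(mystr)
--     curr_word=""
--     while i<size:
--         if mystr[i] == ' ':
--             if curr_word:
--                 words.append(f'{linec}. {curr_word}')
--                 curr_word=""
--                 linec+=1
--         else:
--             curr_word+=mystr[i]
--         i+=1
--     if curr_word:
--         words.append(f'{linec}. {curr_word}')
--
--     return words
-- ===== SOURCE B (Python) =====
-- def enumNPrint(mystr):
--     words = [w for w in mystr.split(' ') if w]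
--     return [f'{i}. {w}' for i, w in enumerate(words, 1)]
-- ===== Notes on version B (the rewrite author's own statement) =====
-- stated objective: faster
-- what changed: Replaces the manual character-by-character scan with a mutable current-word string accumulator and running counter by tokenize-then-format: split on the single-space separator, drop empty tokens, and number the words with enumerate in a comprehension.
import Mathlib
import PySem

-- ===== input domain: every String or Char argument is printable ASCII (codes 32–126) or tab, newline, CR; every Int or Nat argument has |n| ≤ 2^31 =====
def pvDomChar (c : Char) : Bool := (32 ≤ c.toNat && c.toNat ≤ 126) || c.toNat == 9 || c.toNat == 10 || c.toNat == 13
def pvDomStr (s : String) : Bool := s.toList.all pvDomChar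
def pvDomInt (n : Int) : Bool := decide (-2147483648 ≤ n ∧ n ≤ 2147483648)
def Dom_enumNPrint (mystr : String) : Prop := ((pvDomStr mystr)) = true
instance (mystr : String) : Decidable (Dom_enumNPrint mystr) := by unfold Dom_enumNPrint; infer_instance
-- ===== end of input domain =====

-- B renders A's manual character scan as tokenize-then-format (split on ' ', drop empty tokens,
-- number with enumerate); same return value, proved equal on the whole domain (idiomatic rewrite).

-- ===== PORT A =====
-- f'{linec}. {curr_word}'  (shared f-string formatting; exact: str(int) is PySem.Int.toChars)
def fmtWord (i : Int) (w : List Char) : String :=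
  String.ofList (PySem.Int.toChars i ++ '.' :: ' ' :: w)

-- A's while-loop over the characters: state = (words, linec, curr_word)
def loopA : List Char → List String → Int → List Char → List String
  | [], words, linec, curr =>
      if curr.isEmpty then words else words ++ [fmtWord linec curr]
  | c :: rest, words, linec, curr =>
      if c = ' ' then
        if curr.isEmpty then loopA rest words linec curr
        else loopA rest (words ++ [fmtWord linec curr]) (linec + 1) []
      else loopA rest words linec (curr ++ [c])

def enumNPrint (mystr : String) : List String :=
  loopA mystr.toList [] 1 []

-- ===== PORT B =====
def enumNPrint_alt (mystr : String) : List String :=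
  let words := (PySem.Chars.splitOn mystr.toList [' ']).filter (fun w => !w.isEmpty)
  (PySem.List.enumerate words 1).map (fun p => fmtWord p.1 p.2)

-- ===== PRECONDITION & SPEC =====

def Spec_enumNPrint (mystr : String) (out : List String) : Prop := out = enumNPrint_alt mystr
instance (mystr : String) (out : List String) : Decidable (Spec_enumNPrint mystr out) := by unfold Spec_enumNPrint; infer_instance

-- ===== CLAIM (what is proved, stated in full; the proofs are below) =====
def Claim_equal_enumNPrint : Prop := ∀ (mystr : String), Dom_enumNPrint mystr → Spec_enumNPrint mystr (enumNPrint mystr)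


-- ===== LEMMAS AND PROOFS =====

-- split on a single ' ' as a plain structural recursion (proof-side only)
def splitSp : List Char → List Char → List (List Char)
  | pre, [] => [pre]
  | pre, c :: rest => if c = ' ' then pre :: splitSp [] rest else splitSp (pre ++ [c]) rest

lemma go_spec (fuel : Nat) : ∀ (l cur : List Char) (acc : List (List Char)),
    l.length < fuel →
    PySem.Chars.splitOn.go [' '] fuel l cur acc = acc.reverse ++ splitSp cur.reverse l := by
  induction fuel with
  | zero => intro l cur acc h; omega
  | succ fuel ih =>
    intro l cur acc h
    cases l with
    | nil => simp [PySem.Chars.splitOn.go, splitSp]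
    | cons c rest =>
      by_cases hc : c = ' '
      · subst hc
        simp only [PySem.Chars.splitOn.go, List.isPrefixOf, BEq.rfl, Bool.true_and,
          if_true]
        rw [show List.drop [' '].length (' ' :: rest) = rest from rfl]
        rw [ih rest [] (cur.reverse :: acc) (by simpa using Nat.lt_of_succ_lt_succ h)]
        simp [splitSp]
      · simp only [PySem.Chars.splitOn.go, List.isPrefixOf]
        have hbeq : (' ' == c) = false := by simpa [beq_iff_eq] using fun h' => hc h'.symm
        simp only [hbeq, Bool.false_and]
        rw [ih rest (c :: cur) acc (by simpa using Nat.lt_of_succ_lt_succ h)]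
        simp [splitSp, hc]

lemma splitOn_sp (s : List Char) :
    PySem.Chars.splitOn s [' '] = splitSp [] s := by
  unfold PySem.Chars.splitOn
  rw [go_spec (s.length + 1) s [] [] (by omega)]
  simp

lemma loopA_spec (cs : List Char) : ∀ (words : List String) (linec : Int) (curr : List Char),
    loopA cs words linec curr =
      words ++ (PySem.List.enumerate ((splitSp curr cs).filter (fun w => !w.isEmpty)) linec).map
        (fun p => fmtWord p.1 p.2) := by
  induction cs with
  | nil =>
    intro words linec curr
    by_cases hcur : curr.isEmpty
    · simp [loopA, splitSp, hcur]
    · simp [loopA, splitSp, hcur, PySem.List.enumerate_cons, PySem.List.enumerate]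
  | cons c rest ih =>
    intro words linec curr
    by_cases hc : c = ' '
    · subst hc
      by_cases hcur : curr.isEmpty
      · rw [List.isEmpty_iff] at hcur; subst hcur
        simp [loopA, splitSp, ih]
      · simp [loopA, splitSp, hcur, ih, PySem.List.enumerate_cons]
    · simp [loopA, splitSp, hc, ih]

-- ===== VERDICT (by name: the statement is the Claim_ definition above) =====
theorem enumNPrint_spec : Claim_equal_enumNPrint := by
  intro mystr _
  show enumNPrint mystr = enumNPrint_alt mystr
  unfold enumNPrint enumNPrint_alt
  rw [loopA_spec, splitOn_sp]
  simp
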